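-- pv_equiv track=rewrite | github.com/rcbull/bike-share | bikeshare.py | count_user_type
-- ===== SOURCE A (Python) =====
-- def count_user_type(users):
--     """
--     Função que conta os tipos de usuário
--     Argumentos:
--         param1: lista com os usuários
--     Retorna:
--         lista com os valores por tipo de usuário
--     """
--     subscriber = 0
--     customer = 0
--     dependent = 0
--     for user in users:
--         if user == "Subscriber":
--             subscriber += 1
--         elif user == "Customer":
--             customer += 1
--         elif user == "Dependent":
--             dependent += 1
--     return [subscriber, customer, dependent]
-- ===== SOURCE B (Python) =====
-- def count_user_type(users):
--     """
--     Função que conta os tipos de usuário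
--     Argumentos:
--         param1: lista com os usuários
--     Retorna:
--         lista com os valores por tipo de usuário
--     """
--     return [users.count("Subscriber"), users.count("Customer"), users.count("Dependent")]
-- ===== Notes on version B (the rewrite author's own statement) =====
-- stated objective: idiomatic
-- what changed: Replaces the single accumulating loop with three independent list.count scans, one per user type, building the result list directly.
import Mathlib
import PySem

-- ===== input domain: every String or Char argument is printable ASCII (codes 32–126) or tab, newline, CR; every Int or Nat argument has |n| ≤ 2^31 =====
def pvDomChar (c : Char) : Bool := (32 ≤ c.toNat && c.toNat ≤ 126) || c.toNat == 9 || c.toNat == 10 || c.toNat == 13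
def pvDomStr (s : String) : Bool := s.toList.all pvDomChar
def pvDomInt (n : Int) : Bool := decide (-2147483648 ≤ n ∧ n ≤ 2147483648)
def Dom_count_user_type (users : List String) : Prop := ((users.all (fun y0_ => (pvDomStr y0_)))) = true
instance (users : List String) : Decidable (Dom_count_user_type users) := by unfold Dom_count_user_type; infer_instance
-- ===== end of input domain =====

-- B builds the three counts directly with list.count (idiomatic), replacing A's accumulating loop.
-- ===== PORT A =====
def count_user_type (users : List String) : List Int :=
  let r := users.foldl (fun (s : Int × Int × Int) user =>
    if user == "Subscriber" then (s.1 + 1, s.2.1, s.2.2)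
    else if user == "Customer" then (s.1, s.2.1 + 1, s.2.2)
    else if user == "Dependent" then (s.1, s.2.1, s.2.2 + 1)
    else s) (0, 0, 0)
  [r.1, r.2.1, r.2.2]

-- ===== PORT B =====
def count_user_type_alt (users : List String) : List Int :=
  [PySem.List.count users "Subscriber", PySem.List.count users "Customer", PySem.List.count users "Dependent"]

-- ===== PRECONDITION & SPEC =====
def Spec_count_user_type (users : List String) (out : List Int) : Prop := out = count_user_type_alt users
instance (users : List String) (out : List Int) : Decidable (Spec_count_user_type users out) := by unfold Spec_count_user_type; infer_instance

-- ===== CLAIM (what is proved, stated in full; the proofs are below) =====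
def Claim_equal_count_user_type : Prop := ∀ (users : List String), Dom_count_user_type users → Spec_count_user_type users (count_user_type users)

-- ===== LEMMAS AND PROOFS =====

-- ===== VERDICT (by name: the statement is the Claim_ definition above) =====
theorem fold_counts (users : List String) (a b c : Int) :
    users.foldl (fun (s : Int × Int × Int) user =>
      if user == "Subscriber" then (s.1 + 1, s.2.1, s.2.2)
      else if user == "Customer" then (s.1, s.2.1 + 1, s.2.2)
      else if user == "Dependent" then (s.1, s.2.1, s.2.2 + 1)
      else s) (a, b, c)
    = (a + PySem.List.count users "Subscriber",
       b + PySem.List.count users "Customer",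
       c + PySem.List.count users "Dependent") := by
  induction users generalizing a b c with
  | nil => simp [PySem.List.count]
  | cons x xs ih =>
    simp only [List.foldl, PySem.List.count, List.count_cons]
    by_cases h1 : x = "Subscriber" <;> by_cases h2 : x = "Customer" <;>
      by_cases h3 : x = "Dependent" <;>
      simp_all [PySem.List.count] <;> omega

theorem count_user_type_spec : Claim_equal_count_user_type := by
  intro users _
  unfold Spec_count_user_type count_user_type count_user_type_alt
  rw [fold_counts]
  simp
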